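-- pv_equiv track=rewrite | github.com/trzstony/AE_OT | experiments/fm_ot/prepare_celeba.py | build_split_lists
-- ===== SOURCE A (Python) =====
-- from typing import Dict, Iterable, List, Optional
--
-- def build_split_lists(split_map: Dict[str, int]) -> Dict[str, List[str]]:
--     out = {
--         "train": [],
--         "valid": [],
--         "test": [],
--     }
--     for name, split_id in split_map.items():
--         if split_id == 0:
--             out["train"].append(name)
--         elif split_id == 1:
--             out["valid"].append(name)
--         elif split_id == 2:
--             out["test"].append(name)
--     for key in out:
--         out[key].sort()
--     return out
-- ===== SOURCE B (Python) =====
-- def build_split_lists(split_map):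
--     return {
--         key: sorted(name for name, sid in split_map.items() if sid == i)
--         for i, key in enumerate(("train", "valid", "test"))
--     }
-- ===== Notes on version B (the rewrite author's own statement) =====
-- stated objective: simpler
-- what changed: Replaces the single dispatch loop with mutable buckets and an if/elif chain by a dict comprehension that builds each of the three keys directly as a sorted filter of the items, so there is no accumulator state and no post-loop sort pass.
import Mathlib
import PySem

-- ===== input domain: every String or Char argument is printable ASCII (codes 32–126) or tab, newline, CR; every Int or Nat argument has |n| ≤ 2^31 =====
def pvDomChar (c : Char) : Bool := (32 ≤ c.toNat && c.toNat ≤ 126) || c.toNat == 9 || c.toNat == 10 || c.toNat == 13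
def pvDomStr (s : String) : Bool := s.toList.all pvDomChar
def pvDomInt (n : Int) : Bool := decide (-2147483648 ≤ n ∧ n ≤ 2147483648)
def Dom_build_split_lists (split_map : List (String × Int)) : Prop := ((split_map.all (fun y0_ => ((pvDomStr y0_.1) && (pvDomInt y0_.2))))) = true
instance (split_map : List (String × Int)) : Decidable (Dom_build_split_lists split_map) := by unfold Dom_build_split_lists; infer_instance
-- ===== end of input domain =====

-- B replaces A's stateful dispatch loop + post-loop sorts by a comprehension building each
-- key directly as a sorted filter of the items (objective: simpler).

-- ===== PORT A =====
-- A's dict 'out' with the fixed keys "train"/"valid"/"test" is modeled as a triple of lists;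
-- the loop body is the same three-way if/elif dispatch; the final 'for key in out: sort()'
-- sorts each component in insertion order.
def pvStep (out : List String × List String × List String) (p : String × Int) :
    List String × List String × List String :=
  if p.2 == 0 then (out.1 ++ [p.1], out.2.1, out.2.2)
  else if p.2 == 1 then (out.1, out.2.1 ++ [p.1], out.2.2)
  else if p.2 == 2 then (out.1, out.2.1, out.2.2 ++ [p.1])
  else out

def build_split_lists (split_map : List (String × Int)) : List (String × List String) :=
  let out := split_map.foldl pvStep ([], [], [])
  [("train", PySem.List.sorted out.1 (fun x => x) false),
   ("valid", PySem.List.sorted out.2.1 (fun x => x) false),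
   ("test",  PySem.List.sorted out.2.2 (fun x => x) false)]

-- ===== PORT B =====
-- Source B: a dict comprehension over enumerate(("train","valid","test")); each value is
-- sorted(name for name, sid in items if sid == i).
def build_split_lists_alt (split_map : List (String × Int)) : List (String × List String) :=
  (PySem.List.enumerate ["train", "valid", "test"]).map (fun ik =>
    (ik.2, PySem.List.sorted ((split_map.filter (fun p => p.2 == ik.1)).map Prod.fst)
             (fun x => x) false))

-- ===== PRECONDITION & SPEC =====
def Spec_build_split_lists (split_map : List (String × Int)) (out : List (String × List String)) : Prop := out = build_split_lists_alt split_map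
instance (split_map : List (String × Int)) (out : List (String × List String)) : Decidable (Spec_build_split_lists split_map out) := by unfold Spec_build_split_lists; infer_instance

-- ===== CLAIM (what is proved, stated in full; the proofs are below) =====
def Claim_equal_build_split_lists : Prop := ∀ (split_map : List (String × Int)), Dom_build_split_lists split_map → Spec_build_split_lists split_map (build_split_lists split_map)

-- ===== LEMMAS AND PROOFS =====

/-- The names with split id `k`, in list order. -/
def pvBucket (l : List (String × Int)) (k : Int) : List String :=
  (l.filter (fun p => p.2 == k)).map Prod.fst

lemma pvFold_eq (l : List (String × Int)) :
    ∀ (t v e : List String),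
      l.foldl pvStep (t, v, e) = (t ++ pvBucket l 0, v ++ pvBucket l 1, e ++ pvBucket l 2) := by
  induction l with
  | nil => simp [pvBucket]
  | cons p l ih =>
    intro t v e
    by_cases h0 : p.2 = 0
    · simp [pvStep, pvBucket, h0, ih, List.append_assoc]
    · by_cases h1 : p.2 = 1
      · simp [pvStep, pvBucket, h1, ih, List.append_assoc]
      · by_cases h2 : p.2 = 2
        · simp [pvStep, pvBucket, h2, ih, List.append_assoc]
        · simp [pvStep, pvBucket, h0, h1, h2, ih]

-- ===== VERDICT (by name: the statement is the Claim_ definition above) =====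
theorem build_split_lists_spec : Claim_equal_build_split_lists := by
  intro l _
  show _ = _
  simp only [build_split_lists, build_split_lists_alt, pvFold_eq, List.nil_append,
    PySem.List.enumerate, List.map]
  rfl
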